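-- pv_equiv track=rewrite | github.com/Ummi77/noocube | text_formater.py | find_txt_block_in_txt_lines_by_begin_end_markers
-- ===== SOURCE A (Python) =====
-- def find_txt_block_in_txt_lines_by_begin_end_markers (baseTxtLines, beginMark, finalMark):
--     """Найти блок текста по заданным начальному и конечному маркеру в тексте, переведенному в список строк с выходными данными начала
--     и конца искомого блока в виде начального и конечного индеста в списке строк. ищет первое слвпадение начальной и конечной меток так, что бы между ними не  было
--     других подобных им меток. То есть именно кратчайший блок, а не блок, который определяется верхней и нижней метками, а внутри могут быть другие стартовые метки. """
--     #  цикл по строкам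
--     adress = []
--     adress.append(0) # инициализация первым элементом, в котором будут хранится адрес первой метки блока
--     flgBeginFound = 0 # Флаг нахождения первой метки в строке по циклу
--     for inx, line in enumerate(baseTxtLines):
--
--         if beginMark in line : # flgBeginFound == 0 условие, которое ограничивает только первым совпадением, все другие - пропускаются
--             # adress.append(inx)
--             adress[0] = inx -1
--             flgBeginFound = 1
--
--         if finalMark in line and flgBeginFound == 1:
--             adress.append(inx)
--             return adress
-- ===== SOURCE B (Python) =====
-- def find_txt_block_in_txt_lines_by_begin_end_markers(baseTxtLines, beginMark, finalMark):
--     begins = [i for i, line in enumerate(baseTxtLines) if beginMark in line]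
--     finals = [i for i, line in enumerate(baseTxtLines) if finalMark in line]
--     for f in finals:
--         cands = [b for b in begins if b <= f]
--         if cands:
--             return [cands[-1] - 1, f]
--     return None
-- ===== Notes on version B (the rewrite author's own statement) =====
-- stated objective: alternative
-- what changed: Replaces A's single interleaved scan carrying a found-flag and a mutable address cell by a two-phase decomposition: first build the lists of line indices containing the begin and final marks, then pick the first final index f with some begin index b <= f (taking the latest such b) and return [b-1, f].
import Mathlib
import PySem

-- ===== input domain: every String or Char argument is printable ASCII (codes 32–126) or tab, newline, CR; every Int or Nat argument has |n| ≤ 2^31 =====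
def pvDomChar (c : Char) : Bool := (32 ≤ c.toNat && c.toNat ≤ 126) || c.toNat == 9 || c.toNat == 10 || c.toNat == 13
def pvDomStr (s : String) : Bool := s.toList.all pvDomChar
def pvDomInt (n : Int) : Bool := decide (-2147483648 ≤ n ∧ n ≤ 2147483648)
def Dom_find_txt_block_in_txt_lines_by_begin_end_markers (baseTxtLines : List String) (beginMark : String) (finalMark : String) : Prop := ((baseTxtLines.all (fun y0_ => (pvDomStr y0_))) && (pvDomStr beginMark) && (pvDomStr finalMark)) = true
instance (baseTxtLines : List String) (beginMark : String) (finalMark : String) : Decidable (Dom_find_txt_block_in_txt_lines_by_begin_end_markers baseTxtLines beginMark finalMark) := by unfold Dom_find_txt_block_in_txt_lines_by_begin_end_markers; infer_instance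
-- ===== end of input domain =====

-- B replaces A's interleaved flag-carrying scan by a build-the-two-index-lists-then-match decomposition (objective: alternative).

-- ===== PORT A =====
-- the for-loop over enumerate(baseTxtLines) with state (adress[0], flgBeginFound) and early return
def pvGoA (beginMark finalMark : String) (lines : List String) (inx a0 : Int) (flg : Bool) : Option (List Int) :=
  match lines with
  | [] => none
  | line :: rest =>
    let a0' := if PySem.Str.isIn beginMark line then inx - 1 else a0
    let flg' := if PySem.Str.isIn beginMark line then true else flg
    if PySem.Str.isIn finalMark line && flg' then some [a0', inx]
    else pvGoA beginMark finalMark rest (inx + 1) a0' flg'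

def find_txt_block_in_txt_lines_by_begin_end_markers (baseTxtLines : List String) (beginMark : String) (finalMark : String) : Option (List Int) :=
  pvGoA beginMark finalMark baseTxtLines 0 0 false

-- ===== PORT B =====
-- indices of the lines containing the mark, starting at index i
def pvCollectIdx (mark : String) (lines : List String) (i : Int) : List Int :=
  match lines with
  | [] => []
  | l :: rest =>
    if PySem.Str.isIn mark l then i :: pvCollectIdx mark rest (i + 1)
    else pvCollectIdx mark rest (i + 1)

-- for f in finals: cands = [b for b in begins if b <= f]; if cands: return [cands[-1]-1, f]
def pvMatchFinals (finals begins : List Int) : Option (List Int) :=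
  match finals with
  | [] => none
  | f :: rest =>
    match (begins.filter (fun b => b ≤ f)).getLast? with
    | some b => some [b - 1, f]
    | none => pvMatchFinals rest begins

def find_txt_block_in_txt_lines_by_begin_end_markers_alt (baseTxtLines : List String) (beginMark : String) (finalMark : String) : Option (List Int) :=
  pvMatchFinals (pvCollectIdx finalMark baseTxtLines 0) (pvCollectIdx beginMark baseTxtLines 0)

-- ===== PRECONDITION & SPEC =====
def Spec_find_txt_block_in_txt_lines_by_begin_end_markers (baseTxtLines : List String) (beginMark : String) (finalMark : String) (out : Option (List Int)) : Prop := out = find_txt_block_in_txt_lines_by_begin_end_markers_alt baseTxtLines beginMark finalMark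
instance (baseTxtLines : List String) (beginMark : String) (finalMark : String) (out : Option (List Int)) : Decidable (Spec_find_txt_block_in_txt_lines_by_begin_end_markers baseTxtLines beginMark finalMark out) := by unfold Spec_find_txt_block_in_txt_lines_by_begin_end_markers; infer_instance

-- ===== CLAIM (what is proved, stated in full; the proofs are below) =====
def Claim_equal_find_txt_block_in_txt_lines_by_begin_end_markers : Prop := ∀ (baseTxtLines : List String) (beginMark : String) (finalMark : String), Dom_find_txt_block_in_txt_lines_by_begin_end_markers baseTxtLines beginMark finalMark → Spec_find_txt_block_in_txt_lines_by_begin_end_markers baseTxtLines beginMark finalMark (find_txt_block_in_txt_lines_by_begin_end_markers baseTxtLines beginMark finalMark)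

-- ===== LEMMAS AND PROOFS =====

theorem le_of_mem_pvCollectIdx (mark : String) (lines : List String) (i : Int) :
    ∀ x ∈ pvCollectIdx mark lines i, i ≤ x := by
  induction lines generalizing i with
  | nil => simp [pvCollectIdx]
  | cons l rest ih =>
    intro x hx
    simp only [pvCollectIdx] at hx
    split at hx
    · rcases List.mem_cons.mp hx with h | h
      · omega
      · have := ih (i + 1) x h; omega
    · have := ih (i + 1) x hx; omega

-- filtering (· ≤ f) out of acc ++ future keeps exactly acc when acc ≤ f < future
theorem filter_le_split (acc ys : List Int) (f : Int)
    (hacc : ∀ a ∈ acc, a ≤ f) (hys : ∀ b ∈ ys, f < b) :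
    (acc ++ ys).filter (fun b => decide (b ≤ f)) = acc := by
  rw [List.filter_append]
  have h1 : acc.filter (fun b => decide (b ≤ f)) = acc :=
    List.filter_eq_self.mpr (fun a ha => by simpa using hacc a ha)
  have h2 : ys.filter (fun b => decide (b ≤ f)) = [] :=
    List.filter_eq_nil_iff.mpr (fun b hb => by simpa using not_le.mpr (hys b hb))
  rw [h1, h2, List.append_nil]

-- main invariant: A's scan from index i with accumulated begin indices `acc`
theorem pvGoA_eq_pvMatchFinals (beginMark finalMark : String) (lines : List String)
    (i a0 : Int) (flg : Bool) (acc : List Int)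
    (hbound : ∀ b ∈ acc, b < i)
    (hflg : flg = !acc.isEmpty)
    (hlast : flg = true → acc.getLast? = some (a0 + 1)) :
    pvGoA beginMark finalMark lines i a0 flg
      = pvMatchFinals (pvCollectIdx finalMark lines i) (acc ++ pvCollectIdx beginMark lines i) := by
  induction lines generalizing i a0 flg acc with
  | nil => simp [pvGoA, pvCollectIdx, pvMatchFinals]
  | cons l rest ih =>
    have hfut : ∀ x ∈ pvCollectIdx beginMark rest (i + 1), i < x := by
      intro x hx; have := le_of_mem_pvCollectIdx beginMark rest (i + 1) x hx; omega
    by_cases hb : PySem.Str.isIn beginMark l = true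
    · -- begin mark on this line: acc grows to acc ++ [i], a0 becomes i - 1
      have hsplit : pvCollectIdx beginMark (l :: rest) i = i :: pvCollectIdx beginMark rest (i + 1) := by
        simp only [pvCollectIdx, hb, reduceIte]
      by_cases hf : PySem.Str.isIn finalMark l = true
      · -- same line also contains the final mark: A returns [i-1, i]
        have hfl : pvCollectIdx finalMark (l :: rest) i = i :: pvCollectIdx finalMark rest (i + 1) := by
          simp only [pvCollectIdx, hf, reduceIte]
        have hfilter : ((acc ++ [i]) ++ pvCollectIdx beginMark rest (i + 1)).filter
            (fun b => decide (b ≤ i)) = acc ++ [i] := by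
          refine filter_le_split (acc ++ [i]) _ i ?_ hfut
          intro a ha; rcases List.mem_append.mp ha with h | h
          · exact le_of_lt (hbound a h)
          · simp at h; omega
        simp only [pvGoA, hb, hf, reduceIte, Bool.and_true, hsplit, hfl]
        have : acc ++ i :: pvCollectIdx beginMark rest (i + 1)
            = (acc ++ [i]) ++ pvCollectIdx beginMark rest (i + 1) := by simp
        rw [this]
        simp only [pvMatchFinals, hfilter]
        simp
      · -- no final here: recurse with flag set
        have hf' : PySem.Str.isIn finalMark l = false := by simpa using hf
        have hfl : pvCollectIdx finalMark (l :: rest) i = pvCollectIdx finalMark rest (i + 1) := by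
          simp only [pvCollectIdx, hf']; exact if_neg (by simp)
        simp only [pvGoA, hb, hf', reduceIte, Bool.false_and, hsplit, hfl]
        have : acc ++ i :: pvCollectIdx beginMark rest (i + 1)
            = (acc ++ [i]) ++ pvCollectIdx beginMark rest (i + 1) := by simp
        rw [this]
        refine ih (i + 1) (i - 1) true (acc ++ [i]) ?_ (by simp) (fun _ => by simp)
        intro b hb'; rcases List.mem_append.mp hb' with h | h
        · have := hbound b h; omega
        · simp at h; omega
    · -- no begin mark on this line
      have hb' : PySem.Str.isIn beginMark l = false := by simpa using hb
      have hsplit : pvCollectIdx beginMark (l :: rest) i = pvCollectIdx beginMark rest (i + 1) := by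
        simp only [pvCollectIdx, hb']; exact if_neg (by simp)
      by_cases hf : PySem.Str.isIn finalMark l = true
      · have hfl : pvCollectIdx finalMark (l :: rest) i = i :: pvCollectIdx finalMark rest (i + 1) := by
          simp only [pvCollectIdx, hf, reduceIte]
        cases flg with
        | true =>
          -- final found and flag set: A returns [a0, i]
          have hacc : acc.getLast? = some (a0 + 1) := hlast rfl
          have hfilter : (acc ++ pvCollectIdx beginMark rest (i + 1)).filter
              (fun b => decide (b ≤ i)) = acc :=
            filter_le_split acc _ i (fun a ha => le_of_lt (hbound a ha)) hfut
          simp only [pvGoA, hb', hf, hsplit, hfl]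
          simp only [pvMatchFinals, hfilter, hacc]
          simp
        | false =>
          -- final found but flag not set; acc must be empty
          have haccnil : acc = [] := by
            cases acc with
            | nil => rfl
            | cons x xs => simp at hflg
          subst haccnil
          have hfilter : (([] : List Int) ++ pvCollectIdx beginMark rest (i + 1)).filter
              (fun b => decide (b ≤ i)) = [] :=
            filter_le_split [] _ i (by simp) hfut
          simp only [pvGoA, hb', hf, hsplit, hfl]
          simp only [pvMatchFinals, hfilter]
          exact ih (i + 1) a0 false [] (by simp) (by simp) (by simp)
      · -- nothing on this line: plain recursion
        have hf' : PySem.Str.isIn finalMark l = false := by simpa using hf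
        have hfl : pvCollectIdx finalMark (l :: rest) i = pvCollectIdx finalMark rest (i + 1) := by
          simp only [pvCollectIdx, hf']; exact if_neg (by simp)
        simp only [pvGoA, hb', hf', hsplit, hfl]
        exact ih (i + 1) a0 flg acc (fun b hb2 => by have := hbound b hb2; omega) hflg hlast

-- ===== VERDICT (by name: the statement is the Claim_ definition above) =====
theorem find_txt_block_in_txt_lines_by_begin_end_markers_spec : Claim_equal_find_txt_block_in_txt_lines_by_begin_end_markers := by
  intro baseTxtLines beginMark finalMark _
  unfold Spec_find_txt_block_in_txt_lines_by_begin_end_markers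
  unfold find_txt_block_in_txt_lines_by_begin_end_markers
  unfold find_txt_block_in_txt_lines_by_begin_end_markers_alt
  simpa using pvGoA_eq_pvMatchFinals beginMark finalMark baseTxtLines 0 0 false []
    (by simp) (by simp) (by simp)
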